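-- pv_equiv track=rewrite | github.com/pawelnalecz/pulsatile-information | code/utils/data_utils.py | first_n
-- ===== SOURCE A (Python) =====
-- def first_n(iterable, n):
--     i = 0
--     iterator = iter(iterable)
--     while i < n:
--         try:
--             yield next(iterator)
--         except StopIteration:
--             break
--         i += 1
-- ===== SOURCE B (Python) =====
-- def first_n(iterable, n):
--     # Materialize the input once, then slice: two staged passes instead of a
--     # counted one-pass loop. Eager (consumes the whole iterable), unlike A.
--     yield from list(iterable)[:max(n, 0)]
-- ===== Notes on version B (the rewrite author's own statement) =====
-- stated objective: simpler
-- what changed: Replaces the counted while-loop with manual next()/StopIteration handling by materializing the iterable into a list and yielding a slice of it (eager two-stage pass instead of lazy counting).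
import Mathlib
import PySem

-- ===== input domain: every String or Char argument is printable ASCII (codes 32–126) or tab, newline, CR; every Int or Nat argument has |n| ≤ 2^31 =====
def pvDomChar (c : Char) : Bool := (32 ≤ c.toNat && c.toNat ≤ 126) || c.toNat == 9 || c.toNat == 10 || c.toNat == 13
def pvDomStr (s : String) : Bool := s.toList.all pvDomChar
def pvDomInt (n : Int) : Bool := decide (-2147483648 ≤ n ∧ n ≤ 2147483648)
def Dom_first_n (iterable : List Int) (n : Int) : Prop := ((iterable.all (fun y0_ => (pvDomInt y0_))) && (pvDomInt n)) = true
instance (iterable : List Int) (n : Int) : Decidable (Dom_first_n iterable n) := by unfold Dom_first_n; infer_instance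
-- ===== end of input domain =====

-- B materializes the iterable and yields a slice of it instead of counting with next()/StopIteration;
-- B is eager where A is lazy (return value proved equal; consumption of a shared iterator differs).

-- ===== PORT A =====
-- while i < n: try yield next(iterator) except StopIteration: break; i += 1
def first_n_loop : List Int → Int → Int → List Int
  | xs, i, n =>
    if i < n then
      match xs with
      | [] => []            -- StopIteration: break
      | x :: rest => x :: first_n_loop rest (i + 1) n
    else []

def first_n (iterable : List Int) (n : Int) : List Int :=
  first_n_loop iterable 0 n

-- ===== PORT B =====
-- yield from list(iterable)[:max(n, 0)]
def first_n_alt (iterable : List Int) (n : Int) : List Int :=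
  PySem.List.slice iterable none (some (max n 0))

-- ===== PRECONDITION & SPEC =====
def Spec_first_n (iterable : List Int) (n : Int) (out : List Int) : Prop := out = first_n_alt iterable n
instance (iterable : List Int) (n : Int) (out : List Int) : Decidable (Spec_first_n iterable n out) := by unfold Spec_first_n; infer_instance

-- ===== CLAIM =====
def Claim_equal_first_n : Prop := ∀ (iterable : List Int) (n : Int), Dom_first_n iterable n → Spec_first_n iterable n (first_n iterable n)

-- ===== LEMMAS AND PROOFS =====
theorem first_n_loop_eq_take (xs : List Int) : ∀ (i n : Int),
    first_n_loop xs i n = xs.take (n - i).toNat := by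
  induction xs with
  | nil => intro i n; simp [first_n_loop]
  | cons x rest ih =>
    intro i n
    by_cases h : i < n
    · have ht : (n - i).toNat = ((n - (i + 1)).toNat) + 1 := by omega
      simp [first_n_loop, h, ih, ht]
    · have ht : (n - i).toNat = 0 := by omega
      simp [first_n_loop, h, ht]

-- ===== VERDICT =====
theorem first_n_spec : Claim_equal_first_n := by
  intro iterable n _
  unfold Spec_first_n first_n first_n_alt
  rw [PySem.List.slice_to (hb := le_max_right n 0), first_n_loop_eq_take]
  congr 1
  omega
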